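-- pv_equiv track=rewrite | github.com/Lemos2802/Projects | DNS_Protocol/src/queryHandler.py | domainExists
-- ===== SOURCE A (Python) =====
-- def domainExists(name,domain):
-- 	res = False
-- 	for x in range(name.count('.')):
-- 		if name == domain:
-- 			res = True
-- 			break
-- 		else:
-- 			name = name.split('.',1)[1]
-- 	return res
-- ===== SOURCE B (Python) =====
-- def domainExists(name, domain):
--     return '.' in domain and (name == domain or name.endswith('.' + domain))
-- ===== Notes on version B (the rewrite author's own statement) =====
-- stated objective: simpler
-- what changed: Replaced A's label-stripping loop (repeatedly splitting off the first label and re-comparing) with a single direct test: domain contains a dot, and name equals domain or ends with '.'+domain.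
import Mathlib
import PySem

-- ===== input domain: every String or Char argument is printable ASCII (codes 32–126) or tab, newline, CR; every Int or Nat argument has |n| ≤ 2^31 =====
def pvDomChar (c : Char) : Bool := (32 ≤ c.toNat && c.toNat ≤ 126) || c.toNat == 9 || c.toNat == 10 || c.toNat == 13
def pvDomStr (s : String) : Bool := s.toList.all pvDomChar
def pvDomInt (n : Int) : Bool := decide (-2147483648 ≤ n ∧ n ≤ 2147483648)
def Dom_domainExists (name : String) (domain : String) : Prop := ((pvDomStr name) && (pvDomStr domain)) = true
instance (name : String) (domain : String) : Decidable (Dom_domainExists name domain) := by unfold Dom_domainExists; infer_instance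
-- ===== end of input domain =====

-- B replaces A's label-stripping loop with one direct suffix test (same return value; no speed claim).

-- ===== PORT A =====
-- A's loop: res=False; for _ in range(name.count('.')): if name==domain: res=True; break
--           else: name = name.split('.',1)[1]
-- Ported on List Char (exact: the PySem.Str.* wrappers are these same PySem.Chars functions on .toList).
-- The 'none' arm of the indexing is Python's IndexError on split('.',1)[1]; it is unreachable,
-- since the loop only splits while the current name still contains a '.'.
def domainExistsLoopA : Nat → List Char → List Char → Bool
  | 0, _, _ => false
  | n + 1, name, domain =>
      if name = domain then true
      else
        match PySem.List.pyGet? ((PySem.Chars.splitMax? name ['.'] 1).getD []) 1 with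
        | some rest => domainExistsLoopA n rest domain
        | none => false

def domainExists (name : String) (domain : String) : Bool :=
  domainExistsLoopA (PySem.Chars.count name.toList ['.']) name.toList domain.toList

-- ===== PORT B =====
-- Source B: return '.' in domain and (name == domain or name.endswith('.' + domain))
-- ('.' + domain is exactly '.' :: domain.toList on the Chars side)
def domainExists_alt (name : String) (domain : String) : Bool :=
  PySem.Chars.isIn ['.'] domain.toList
    && (name.toList = domain.toList || PySem.Chars.endswith name.toList ('.' :: domain.toList))

-- ===== PRECONDITION & SPEC =====
def Spec_domainExists (name : String) (domain : String) (out : Bool) : Prop := out = domainExists_alt name domain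
instance (name : String) (domain : String) (out : Bool) : Decidable (Spec_domainExists name domain out) := by unfold Spec_domainExists; infer_instance

-- ===== CLAIM (what is proved, stated in full; the proofs are below) =====
def Claim_equal_domainExists : Prop := ∀ (name : String) (domain : String), Dom_domainExists name domain → Spec_domainExists name domain (domainExists name domain)

-- ===== LEMMAS AND PROOFS =====

-- count.go with the single-char needle '.' counts the dots
theorem countGo_dot (fuel : Nat) : ∀ (l : List Char) (acc : Nat), l.length ≤ fuel →
    PySem.Chars.count.go ['.'] fuel l acc = acc + l.count '.' := by
  induction fuel with
  | zero => intro l acc h; cases l with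
      | nil => simp [PySem.Chars.count.go]
      | cons c t => simp at h
  | succ n ih =>
      intro l acc h
      cases l with
      | nil => simp [PySem.Chars.count.go]
      | cons c t =>
          simp only [List.length_cons, Nat.succ_le_succ_iff] at h
          by_cases hc : c = '.'
          · subst hc
            rw [PySem.Chars.count.go]
            simp only [List.isPrefixOf, beq_self_eq_true, Bool.true_and, if_true,
              List.length_cons, List.length_nil, List.drop_succ_cons, List.drop_zero]
            rw [ih t (acc + 1) h]
            simp
            omega
          · rw [PySem.Chars.count.go]
            rw [show (['.'].isPrefixOf (c :: t)) = false by
              simp [List.isPrefixOf]; exact fun h' => hc h'.symm]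
            simp only [Bool.false_eq_true, if_false]
            rw [ih t acc h]
            simp [hc]

theorem count_dot (l : List Char) : PySem.Chars.count l ['.'] = l.count '.' := by
  have := countGo_dot l.length l 0 le_rfl
  simpa [PySem.Chars.count] using this

-- splitOnMax.go with maxsplit exhausted returns the remainder as the last piece
theorem splitGo_zero (fuel : Nat) (l cur : List Char) (acc : List (List Char)) :
    PySem.Chars.splitOnMax.go ['.'] fuel 0 l cur acc = ((cur.reverse ++ l) :: acc).reverse := by
  cases fuel with
  | zero => rw [PySem.Chars.splitOnMax.go.eq_def]
  | succ n => cases l with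
      | nil => rw [PySem.Chars.splitOnMax.go.eq_def]; simp
      | cons c t => rw [PySem.Chars.splitOnMax.go.eq_def]; simp

-- splitOnMax.go with maxsplit 1 on pre ++ '.'::tail ('.' ∉ pre) splits at the first dot
theorem splitGo_one (fuel : Nat) : ∀ (pre tail cur : List Char) (acc : List (List Char)),
    '.' ∉ pre → pre.length < fuel →
    PySem.Chars.splitOnMax.go ['.'] fuel 1 (pre ++ '.' :: tail) cur acc
      = acc.reverse ++ [cur.reverse ++ pre, tail] := by
  induction fuel with
  | zero => intro pre tail cur acc _ h; omega
  | succ n ih =>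
      intro pre tail cur acc hpre h
      cases pre with
      | nil =>
          rw [PySem.Chars.splitOnMax.go.eq_def]
          simp only [List.nil_append]
          rw [show (['.'].isPrefixOf ('.' :: tail)) = true by simp [List.isPrefixOf]]
          simp only [if_neg (by norm_num : ¬(1 : Nat) = 0), if_true]
          rw [show List.drop ['.'].length ('.' :: tail) = tail from rfl]
          rw [splitGo_zero]
          simp
      | cons c pre' =>
          have hc : c ≠ '.' := fun h' => hpre (h' ▸ List.mem_cons_self ..)
          rw [PySem.Chars.splitOnMax.go.eq_def]
          simp only [List.cons_append]
          rw [show (['.'].isPrefixOf (c :: (pre' ++ '.' :: tail))) = false by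
            simp [List.isPrefixOf]; exact fun h' => hc h'.symm]
          simp only [if_neg (by norm_num : ¬(1 : Nat) = 0), Bool.false_eq_true, if_false]
          rw [ih pre' tail (c :: cur) acc (fun hm => hpre (List.mem_cons_of_mem _ hm))
            (by simp at h ⊢; omega)]
          simp

theorem splitMax_one (pre tail : List Char) (hpre : '.' ∉ pre) :
    PySem.Chars.splitMax? (pre ++ '.' :: tail) ['.'] 1 = some [pre, tail] := by
  rw [PySem.Chars.splitMax?]
  simp only [List.isEmpty_cons, Bool.false_eq_true, if_false]
  rw [PySem.Chars.splitOnMax]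
  rw [if_neg (by norm_num)]
  rw [show (1 : Int).toNat = 1 from rfl]
  rw [splitGo_one ((pre ++ '.' :: tail).length + 1) pre tail [] [] hpre (by simp)]
  simp

-- the suffix-step characterisation: a dotted suffix of pre ++ '.'::tail ('.' ∉ pre)
-- is either '.'::tail itself or a dotted suffix of tail
theorem dotted_suffix_step (pre tail ds : List Char) (hpre : '.' ∉ pre) :
    ('.' :: ds <:+ pre ++ '.' :: tail) ↔ (ds = tail ∨ '.' :: ds <:+ tail) := by
  constructor
  · intro h
    have h2 : ('.' :: tail) <:+ pre ++ '.' :: tail := List.suffix_append pre ('.' :: tail)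
    rcases List.suffix_or_suffix_of_suffix h h2 with hle | hge
    · rcases List.suffix_cons_iff.mp hle with heq | hsub
      · exact Or.inl (by injection heq)
      · exact Or.inr hsub
    · rcases List.suffix_cons_iff.mp hge with heq | hsub
      · exact Or.inl (by injection heq with _ h'; exact h'.symm)
      · -- '.'::tail <:+ ds would force a '.' inside pre, contradiction
        obtain ⟨mid, hmid⟩ := hsub
        obtain ⟨ww, hww⟩ := h
        exfalso
        apply hpre
        have heq2 : pre ++ ('.' :: tail) = (ww ++ '.' :: mid) ++ ('.' :: tail) := by
          rw [← hww, ← hmid]; simp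
        have hp : pre = ww ++ '.' :: mid := List.append_cancel_right heq2
        rw [hp]; simp
  · rintro (rfl | h)
    · exact List.suffix_append pre ('.' :: ds)
    · exact h.trans ((List.suffix_cons '.' tail).trans (List.suffix_append pre ('.' :: tail)))

-- main loop characterisation: A's loop run for (count of dots) steps is B's direct test
theorem loopA_eq (k : Nat) : ∀ (cs ds : List Char), cs.count '.' = k →
    domainExistsLoopA k cs ds
      = (('.' ∈ ds : Bool) && ((cs = ds : Bool) || ('.' :: ds).isSuffixOf cs)) := by
  induction k with
  | zero =>
      intro cs ds hk
      have hnd : '.' ∉ cs := by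
        intro h; have : 0 < cs.count '.' := List.count_pos_iff.mpr h; omega
      by_cases hmem : '.' ∈ ds
      · have h1 : (cs = ds : Bool) = false := by
          simp only [decide_eq_false_iff_not]; intro h; exact hnd (h ▸ hmem)
        have h2 : (('.' :: ds).isSuffixOf cs) = false := by
          rw [Bool.eq_false_iff]; intro h
          exact hnd ((List.isSuffixOf_iff_suffix.mp h).subset (List.mem_cons_self ..))
        simp [domainExistsLoopA, h1, h2]
      · simp [domainExistsLoopA, hmem]
  | succ n ih =>
      intro cs ds hk
      have hmem : '.' ∈ cs := List.count_pos_iff.mp (by omega)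
      obtain ⟨pre, tail, hdecomp, hpre⟩ :
          ∃ pre tail, cs = pre ++ '.' :: tail ∧ '.' ∉ pre := by
        refine ⟨cs.takeWhile (fun c => !(c = '.' : Bool)),
                (cs.dropWhile (fun c => !(c = '.' : Bool))).tail, ?_, ?_⟩
        · have hne : cs.dropWhile (fun c => !(c = '.' : Bool)) ≠ [] := by
            intro h
            have h2 := List.dropWhile_eq_nil_iff.mp h '.' hmem
            simp at h2
          have hhead : (cs.dropWhile (fun c => !(c = '.' : Bool))).head hne = '.' := by
            have := List.head_dropWhile_not (fun c => !(c = '.' : Bool)) hne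
            simpa using this
          conv_lhs => rw [← List.takeWhile_append_dropWhile
            (p := fun c => !(c = '.' : Bool)) (l := cs)]
          congr 1
          have h3 := List.cons_head_tail hne
          rw [hhead] at h3
          exact h3.symm
        · intro h
          have := List.mem_takeWhile_imp h
          simp at this
      subst hdecomp
      have htail : tail.count '.' = n := by
        have hcnt : (pre ++ '.' :: tail).count '.' = pre.count '.' + (1 + tail.count '.') := by
          simp [List.count_append]; omega
        have hpz : pre.count '.' = 0 := List.count_eq_zero.mpr hpre
        omega
      rw [domainExistsLoopA]
      by_cases heq : pre ++ '.' :: tail = ds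
      · rw [if_pos heq]
        have hm : '.' ∈ ds := heq ▸ (by simp : '.' ∈ pre ++ '.' :: tail)
        symm
        simp [hm, heq]
      · rw [if_neg heq]
        rw [splitMax_one pre tail hpre]
        simp only [Option.getD_some]
        rw [show PySem.List.pyGet? [pre, tail] (1 : Int) = some tail from rfl]
        change domainExistsLoopA n tail ds = _
        rw [ih tail ds htail]
        by_cases hmd : '.' ∈ ds
        · simp only [hmd, decide_true, Bool.true_and]
          have hiff := dotted_suffix_step pre tail ds hpre
          rw [show ((pre ++ '.' :: tail : List Char) = ds : Bool) = false by
            simpa using heq]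
          simp only [Bool.false_or]
          rcases Bool.eq_false_or_eq_true ((tail = ds : Bool)) with hteq | hteq
          · rw [hteq]
            have hds : tail = ds := by simpa using hteq
            simp only [Bool.true_or]
            exact (List.isSuffixOf_iff_suffix.mpr (hiff.mpr (Or.inl hds.symm))).symm
          · rw [hteq]
            simp only [Bool.false_or]
            have hne : tail ≠ ds := by simpa using hteq
            rcases Bool.eq_false_or_eq_true (('.' :: ds).isSuffixOf tail) with hb | hb
            · rw [hb]
              exact (List.isSuffixOf_iff_suffix.mpr
                (hiff.mpr (Or.inr (List.isSuffixOf_iff_suffix.mp hb)))).symm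
            · rw [hb]
              symm
              rw [Bool.eq_false_iff]
              intro hx
              rcases hiff.mp (List.isSuffixOf_iff_suffix.mp hx) with h' | hs
              · exact hne h'.symm
              · exact (Bool.eq_false_iff.mp hb) (List.isSuffixOf_iff_suffix.mpr hs)
        · simp [hmd]

theorem isIn_dot (ds : List Char) : PySem.Chars.isIn ['.'] ds = ('.' ∈ ds : Bool) := by
  rcases Bool.eq_false_or_eq_true (PySem.Chars.isIn ['.'] ds) with h | h <;> rw [h]
  · have hin := (PySem.Chars.isIn_iff_infix _ _).mp h
    symm; simp only [decide_eq_true_eq]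
    exact hin.subset (List.mem_cons_self ..)
  · have hni := (PySem.Chars.isIn_eq_false_iff _ _).mp h
    symm; simp only [decide_eq_false_iff_not]
    intro hm
    obtain ⟨s, t, rfl⟩ := List.append_of_mem hm
    exact hni ⟨s, t, by simp⟩

-- ===== VERDICT (by name: the statement is the Claim_ definition above) =====
theorem domainExists_spec : Claim_equal_domainExists := by
  intro name domain _
  unfold Spec_domainExists domainExists domainExists_alt
  rw [count_dot, loopA_eq _ _ _ rfl, isIn_dot, PySem.Chars.endswith]
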